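-- pv_equiv track=rewrite | github.com/mvwicky/sfmlPhys | matrixFuncs.py | createSquareMatrix
-- ===== SOURCE A (Python) =====
-- def createMatrix(m,n): # returns an empty(zero filled) mxn sized matrix
-- 	tMat=[]
-- 	for i in range(m):
-- 		tMat.append([])
-- 		for j in range(n):
-- 			tMat[i].append(0)
-- 	return tMat
--
-- def createSquareMatrix(m, ident=False): # returns an empty(zero filled) mxm matrix
-- 	if ident==False:
-- 		tMat=createMatrix(m,m)
-- 		return tMat
-- 	elif ident==True:
-- 		tMat=[]
-- 		for i in range(m):
-- 			tMat.append([])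
-- 			for j in range(m):
-- 				if i==j:
-- 					tMat[i].append(1)
-- 				else:
-- 					tMat[i].append(0)
-- 		return tMat
-- ===== SOURCE B (Python) =====
-- def createSquareMatrix(m, ident=False): # identity built by shifting a one-hot row; zeros by replication
-- 	if ident==False:
-- 		return [[0]*m for _ in range(m)]
-- 	elif ident==True:
-- 		tMat=[]
-- 		row=[1]+[0]*(m-1)
-- 		for _ in range(m):
-- 			tMat.append(row)
-- 			row=[0]+row[:-1]
-- 		return tMat
-- ===== Notes on version B (the rewrite author's own statement) =====
-- stated objective: alternative
-- what changed: B builds the identity matrix by generating each row from the previous one via a shift (prepend 0, drop the last element) starting from the one-hot row [1,0,...,0], and zero-fills by list replication, instead of A's nested per-element loop testing i==j.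
import Mathlib
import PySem

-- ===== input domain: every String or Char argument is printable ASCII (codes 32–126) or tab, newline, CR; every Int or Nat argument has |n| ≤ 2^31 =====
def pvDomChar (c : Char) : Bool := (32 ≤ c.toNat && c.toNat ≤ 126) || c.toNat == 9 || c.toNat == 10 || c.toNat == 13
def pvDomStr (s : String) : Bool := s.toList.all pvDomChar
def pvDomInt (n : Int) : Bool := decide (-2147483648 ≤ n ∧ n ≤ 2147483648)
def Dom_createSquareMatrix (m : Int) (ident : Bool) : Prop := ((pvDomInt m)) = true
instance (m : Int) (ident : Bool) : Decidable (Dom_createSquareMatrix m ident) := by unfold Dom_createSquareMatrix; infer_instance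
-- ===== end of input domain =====

-- B builds the identity by row shifting (prepend 0, drop last) from the one-hot row, and
-- zero-fills by replication, instead of A's nested i==j loop (objective: alternative).

-- ===== PORT A =====
-- helper of A: createMatrix(m, n)
def createMatrixA (m n : Int) : List (List Int) :=
  (PySem.List.pyRange 0 m 1).foldl (fun tMat _i =>
    tMat ++ [(PySem.List.pyRange 0 n 1).foldl (fun row _j => row ++ [(0 : Int)]) []]) []

def createSquareMatrix (m : Int) (ident : Bool) : List (List Int) :=
  if ident = false then
    createMatrixA m m
  else -- ident == True (Bool has no third value, so Python's implicit fall-through is unreachable)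
    (PySem.List.pyRange 0 m 1).foldl (fun tMat i =>
      tMat ++ [(PySem.List.pyRange 0 m 1).foldl
        (fun row j => row ++ [if i = j then (1 : Int) else 0]) []]) []

-- ===== PORT B =====
def createSquareMatrix_alt (m : Int) (ident : Bool) : List (List Int) :=
  if ident = false then
    List.replicate m.toNat (List.replicate m.toNat (0 : Int))
  else
    -- row = [1] + [0]*(m-1); each iteration appends row, then row = [0] + row[:-1]
    ((PySem.List.pyRange 0 m 1).foldl
      (fun (st : List (List Int) × List Int) _ =>
        (st.1 ++ [st.2], 0 :: PySem.List.slice st.2 none (some (-1))))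
      ([], 1 :: List.replicate (m - 1).toNat (0 : Int))).1

-- ===== PRECONDITION & SPEC =====
def Spec_createSquareMatrix (m : Int) (ident : Bool) (out : List (List Int)) : Prop := out = createSquareMatrix_alt m ident
instance (m : Int) (ident : Bool) (out : List (List Int)) : Decidable (Spec_createSquareMatrix m ident out) := by unfold Spec_createSquareMatrix; infer_instance

-- ===== CLAIM (what is proved, stated in full; the proofs are below) =====
def Claim_equal_createSquareMatrix : Prop := ∀ (m : Int) (ident : Bool), Dom_createSquareMatrix m ident → Spec_createSquareMatrix m ident (createSquareMatrix m ident)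

-- ===== LEMMAS AND PROOFS =====

-- the k-th identity row of size m
def rowk (m k : Nat) : List Int := (List.replicate m (0 : Int)).set k 1

-- A's zero-fill helper is a replicate of replicates.
theorem createMatrixA_eq (m n : Int) :
    createMatrixA m n = List.replicate m.toNat (List.replicate n.toNat (0 : Int)) := by
  unfold createMatrixA
  rw [PySem.List.foldl_append_singleton_eq_map]
  rw [PySem.List.foldl_append_singleton_eq_map]
  simp [List.map_const', PySem.List.length_pyRange_one]

-- A's identity row i equals rowk.
theorem rowA_eq (m : Int) (k : Nat) :
    (PySem.List.pyRange 0 m 1).map (fun j => if (k : Int) = j then (1 : Int) else 0)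
      = rowk m.toNat k := by
  apply List.ext_getElem
  · simp [PySem.List.length_pyRange_one, rowk]
  · intro p h1 h2
    simp only [rowk, List.getElem_map, PySem.List.getElem_pyRange_one, List.getElem_set,
      List.getElem_replicate, zero_add]
    by_cases h : k = p
    · simp [h]
    · simp [if_neg (fun he => h (by exact_mod_cast he))]

-- shifting rowk k yields rowk (k+1)
theorem shift_rowk (m k : Nat) (hk : k < m) :
    (0 : Int) :: (rowk m k).dropLast = rowk m (k + 1) := by
  apply List.ext_getElem
  · simp [rowk]; omega
  · intro p h1 h2
    have hlen : (rowk m k).length = m := by simp [rowk]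
    have hp : p < m := by simpa [rowk] using h2
    cases p with
    | zero => simp [rowk]
    | succ q =>
      have hq : q < m - 1 := by
        have : q + 1 < m := hp
        omega
      simp only [List.getElem_cons_succ, List.getElem_dropLast, rowk, List.getElem_set,
        List.getElem_replicate]
      by_cases h : k = q
      · simp [h]
      · simp [h]

-- the fold invariant: after n steps, accumulated rows 0..n-1 and current row rowk n
theorem fold_inv (m : Int) (n : Nat) (hn : n ≤ m.toNat) :
    (PySem.List.pyRange 0 (n : Int) 1).foldl
      (fun (st : List (List Int) × List Int) _ =>
        (st.1 ++ [st.2], 0 :: PySem.List.slice st.2 none (some (-1))))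
      ([], rowk m.toNat 0)
    = ((List.range n).map (rowk m.toNat), rowk m.toNat n) := by
  induction n with
  | zero => simp [PySem.List.pyRange_one_eq_nil]
  | succ n ih =>
    have hn' : n ≤ m.toNat := Nat.le_of_succ_le hn
    have hsplit : PySem.List.pyRange 0 ((n : Int) + 1) 1
        = PySem.List.pyRange 0 (n : Int) 1 ++ [(n : Int)] :=
      PySem.List.pyRange_one_succ_right (by positivity)
    have hcast : ((n + 1 : Nat) : Int) = (n : Int) + 1 := by push_cast; ring
    rw [hcast, hsplit, List.foldl_append, ih hn']
    simp only [List.foldl_cons, List.foldl_nil]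
    rw [PySem.List.slice_to_neg_one, shift_rowk m.toNat n (by omega)]
    rw [List.range_succ, List.map_append]
    simp

-- the initial row [1] + [0]*(m-1) is rowk 0 (for m > 0)
theorem init_row (m : Int) (hm : 0 < m) :
    (1 : Int) :: List.replicate (m - 1).toNat (0 : Int) = rowk m.toNat 0 := by
  have h : m.toNat = (m - 1).toNat + 1 := by omega
  rw [rowk, h, List.replicate_succ, List.set_cons_zero]

theorem createSquareMatrix_eq_alt (m : Int) (ident : Bool) :
    createSquareMatrix m ident = createSquareMatrix_alt m ident := by
  unfold createSquareMatrix createSquareMatrix_alt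
  cases ident with
  | false => simp [createMatrixA_eq]
  | true =>
    rw [if_neg (by decide), if_neg (by decide)]
    rcases le_or_gt m 0 with hm | hm
    · rw [PySem.List.pyRange_one_eq_nil hm]
      rfl
    · simp only [PySem.List.foldl_append_singleton_eq_map, List.nil_append]
      rw [init_row m hm]
      have hmn : m = (m.toNat : Int) := by omega
      rw [hmn, fold_inv ((m.toNat : Int)) m.toNat (by omega)]
      apply List.ext_getElem
      · simp [PySem.List.length_pyRange_one]; omega
      · intro k h1 h2
        simp only [List.getElem_map, PySem.List.getElem_pyRange_one, List.getElem_range, zero_add]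
        simpa using rowA_eq ((m.toNat : Int)) k

-- ===== VERDICT (by name: the statement is the Claim_ definition above) =====
theorem createSquareMatrix_spec : Claim_equal_createSquareMatrix := by
  intro m ident _
  exact createSquareMatrix_eq_alt m ident
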